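-- pv_equiv track=rewrite | github.com/brunoadsba/john | backend/services/error_analysis/trend_analyzer.py | group_similar_errors
-- ===== SOURCE A (Python) =====
-- from typing import Dict, List, Any
--
-- def group_similar_errors(errors: List[Dict]) -> Dict[str, List[Dict]]:
--     """
--     Agrupa erros similares por mensagem/tipo
--
--     Args:
--         errors: Lista de erros
--
--     Returns:
--         Dicionário com erros agrupados
--     """
--     groups = {}
--
--     for error in errors:
--         # Cria chave de agrupamento baseada em tipo e mensagem (primeiras palavras)
--         message_words = error.get("message", "").split()[:5]
--         key = f"{error.get('type', 'other')}_{'_'.join(message_words)}"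
--
--         if key not in groups:
--             groups[key] = []
--
--         groups[key].append(error)
--
--     return groups
-- ===== SOURCE B (Python) =====
-- def group_similar_errors(errors):
--     """Two-pass regrouping: compute each error's group key, list the distinct
--     keys in first-occurrence order, then build each group by one filter pass."""
--     def _group_key(error):
--         message_words = error.get("message", "").split()[:5]
--         return f"{error.get('type', 'other')}_{'_'.join(message_words)}"
--     keys = list(dict.fromkeys(_group_key(e) for e in errors))
--     return {k: [e for e in errors if _group_key(e) == k] for k in keys}
-- ===== Notes on version B (the rewrite author's own statement) =====
-- stated objective: alternative
-- what changed: A builds the groups in one pass with a mutable dict of lists; B computes every error's key, takes the distinct keys in first-occurrence order (dict.fromkeys), and builds each group by an independent filter pass over the input.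
import Mathlib
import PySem

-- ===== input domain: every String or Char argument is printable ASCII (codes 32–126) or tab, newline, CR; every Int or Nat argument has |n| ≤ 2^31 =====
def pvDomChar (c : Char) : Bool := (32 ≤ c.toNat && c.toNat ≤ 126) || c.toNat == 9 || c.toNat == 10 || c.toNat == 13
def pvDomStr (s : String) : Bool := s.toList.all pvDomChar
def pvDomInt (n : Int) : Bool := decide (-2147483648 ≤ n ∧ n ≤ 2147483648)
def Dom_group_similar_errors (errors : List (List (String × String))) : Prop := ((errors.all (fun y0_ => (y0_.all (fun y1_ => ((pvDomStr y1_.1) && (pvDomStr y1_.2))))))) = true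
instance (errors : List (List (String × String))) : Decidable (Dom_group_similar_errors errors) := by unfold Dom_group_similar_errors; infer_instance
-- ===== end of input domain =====

-- B regroups by two passes (distinct keys, then one filter per key) instead of A's single mutable-dict loop; same return value, proved equal.


-- key = f"{error.get('type','other')}_{'_'.join(error.get('message','').split()[:5])}" (same expression in both Pythons)
def errKey (error : List (String × String)) : String :=
  let d := PySem.Dict.ofList error
  String.ofList ((d.getD "type" "other").toList ++
    '_' :: PySem.Chars.join ['_'] ((PySem.Chars.split₀ (d.getD "message" "").toList).take 5))

-- ===== PORT A =====
-- the body of A's for-loop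
def pvStep (groups : PySem.Dict String (List (List (String × String))))
    (error : List (String × String)) : PySem.Dict String (List (List (String × String))) :=
  let key := errKey error
  let groups := if groups.contains key then groups else groups.insert key []
  groups.modify key [] (fun v => v ++ [error])

def group_similar_errors (errors : List (List (String × String))) : List (String × List (List (String × String))) :=
  (errors.foldl pvStep PySem.Dict.empty).items

-- ===== PORT B =====
def group_similar_errors_alt (errors : List (List (String × String))) : List (String × List (List (String × String))) :=
  let keys := PySem.List.dedup (errors.map errKey)
  keys.map (fun k => (k, errors.filter (fun e => errKey e == k)))

-- ===== PRECONDITION & SPEC =====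
def Spec_group_similar_errors (errors : List (List (String × String))) (out : List (String × List (List (String × String)))) : Prop := out = group_similar_errors_alt errors
instance (errors : List (List (String × String))) (out : List (String × List (List (String × String)))) : Decidable (Spec_group_similar_errors errors out) := by unfold Spec_group_similar_errors; infer_instance

-- ===== CLAIM (what is proved, stated in full; the proofs are below) =====
def Claim_equal_group_similar_errors : Prop := ∀ (errors : List (List (String × String))), Dom_group_similar_errors errors → Spec_group_similar_errors errors (group_similar_errors errors)

-- ===== LEMMAS AND PROOFS =====

theorem pvStep_keys (d : PySem.Dict String (List (List (String × String)))) (e : List (String × String)) :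
    (pvStep d e).keys = PySem.Set.add d.keys (errKey e) := by
  unfold pvStep PySem.Set.add
  by_cases h : d.contains (errKey e)
  · simp only [h, if_true, PySem.Dict.keys_modify]
    rw [PySem.Dict.keys_insert_of_contains _ _ h]
    rw [PySem.Dict.contains_iff_mem_keys] at h
    simp [h]
  · simp only [Bool.not_eq_true] at h
    simp only [h, Bool.false_eq_true, if_false, PySem.Dict.keys_modify,
      PySem.Dict.insert_insert_self]
    rw [PySem.Dict.keys_insert_of_not_contains _ _ h]
    have hm : errKey e ∉ d.keys := by
      rw [← PySem.Dict.contains_iff_mem_keys]; simp [h]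
    simp [PySem.Set.contains, hm]

theorem pvStep_getD (d : PySem.Dict String (List (List (String × String)))) (e : List (String × String)) (k : String) :
    (pvStep d e).getD k [] = if errKey e = k then d.getD k [] ++ [e] else d.getD k [] := by
  unfold pvStep
  by_cases h : d.contains (errKey e)
  · simp only [h, if_true, PySem.Dict.getD_modify]
    by_cases hk : k = errKey e
    · subst hk; simp
    · simp [hk, Ne.symm hk]
  · simp only [Bool.not_eq_true] at h
    simp only [h, Bool.false_eq_true, if_false, PySem.Dict.getD_modify, PySem.Dict.getD_insert]
    by_cases hk : k = errKey e
    · subst hk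
      simp [PySem.Dict.getD_of_not_contains d ([] : List (List (String × String))) h]
    · simp [hk, Ne.symm hk]

theorem keys_foldl_pvStep (l : List (List (String × String))) (d : PySem.Dict String (List (List (String × String)))) :
    (l.foldl pvStep d).keys = PySem.Set.update d.keys (l.map errKey) := by
  induction l generalizing d with
  | nil => rfl
  | cons x xs ih =>
      simp only [List.foldl_cons, List.map_cons]
      rw [ih, pvStep_keys]
      simp only [PySem.Set.update, List.foldl_cons]

theorem getD_foldl_pvStep (l : List (List (String × String))) (d : PySem.Dict String (List (List (String × String)))) (k : String) :
    (l.foldl pvStep d).getD k [] = d.getD k [] ++ l.filter (fun e => errKey e == k) := by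
  induction l generalizing d with
  | nil => simp
  | cons x xs ih =>
      simp only [List.foldl_cons, List.filter_cons]
      rw [ih, pvStep_getD]
      by_cases hk : errKey x = k <;> simp [hk]

-- ===== VERDICT (by name: the statement is the Claim_ definition above) =====
theorem group_similar_errors_spec : Claim_equal_group_similar_errors := by
  intro errors _
  unfold Spec_group_similar_errors group_similar_errors group_similar_errors_alt
  have hkeys : (errors.foldl pvStep PySem.Dict.empty).keys = PySem.Set.ofList (errors.map errKey) := by
    rw [keys_foldl_pvStep]; rfl
  have hnodup : (errors.foldl pvStep PySem.Dict.empty).keys.Nodup := by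
    rw [hkeys]; exact PySem.Set.nodup_ofList _
  rw [PySem.Dict.items_eq_map_keys _ hnodup [], hkeys, PySem.List.dedup_eq_ofList]
  apply List.map_congr_left
  intro k _
  rw [getD_foldl_pvStep]
  simp [PySem.Dict.getD_empty]
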